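-- pv_equiv track=rewrite | github.com/FazeCT/ctf | Cryptoverse CTF 2022/Cherry Blossom.py | solve
-- ===== SOURCE A (Python) =====
-- def solve(n,m,b):
--     sum = 0
--     ans = -999999999999999999
--     cnt = 0
--     for i in range(0,n):
--         sum += b[i]
--         cnt += 1
--         if ans < sum and cnt <= m:
--             ans = sum
--         if sum < 0:
--             sum = 0
--             cnt = 0
--     return ans
-- ===== SOURCE B (Python) =====
-- def solve(n, m, b):
--     ans = -999999999999999999
--     i = 0
--     while i < n:
--         # carve one maximal segment: prefix sums until one goes below zero
--         pref = []
--         s = 0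
--         while i < n:
--             s += b[i]
--             pref.append(s)
--             i += 1
--             if s < 0:
--                 break
--         # only the first min(len(pref), m) prefix sums are valid candidates
--         k = min(len(pref), m)
--         for j in range(k):
--             if pref[j] > ans:
--                 ans = pref[j]
--     return ans
-- ===== Notes on version B (the rewrite author's own statement) =====
-- stated objective: alternative
-- what changed: A's single loop that threads a (sum, ans, cnt) running state is replaced by a two-phase decomposition: an outer loop carves b[:n] into maximal segments (each ending right after a prefix sum drops below zero), collects each segment's prefix sums in a list, and a separate per-segment pass scans only the first min(len(segment), m) prefix sums to update the answer.
import Mathlib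
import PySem

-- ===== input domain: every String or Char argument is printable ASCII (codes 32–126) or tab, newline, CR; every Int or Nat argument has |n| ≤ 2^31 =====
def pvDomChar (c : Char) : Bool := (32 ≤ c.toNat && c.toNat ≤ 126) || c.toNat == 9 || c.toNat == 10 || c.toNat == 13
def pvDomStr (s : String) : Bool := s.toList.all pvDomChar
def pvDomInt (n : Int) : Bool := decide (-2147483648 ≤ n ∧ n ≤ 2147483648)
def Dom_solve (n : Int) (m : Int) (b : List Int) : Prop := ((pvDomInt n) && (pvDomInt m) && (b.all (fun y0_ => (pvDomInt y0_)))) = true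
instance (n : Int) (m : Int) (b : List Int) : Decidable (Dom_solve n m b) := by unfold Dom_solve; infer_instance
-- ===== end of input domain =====

-- B re-expresses A's single running-state loop as segment carving + a per-segment scan
-- (alternative decomposition, same O(n) cost); equivalence of return values is proved below.

-- ===== PORT A =====
-- literal port of A: one fold over range(0, n) carrying (sum, ans, cnt)
def solve (n : Int) (m : Int) (b : List Int) : Int :=
  (((PySem.List.pyRange 0 n 1).foldl
      (fun (st : Int × Int × Int) i =>
        let sum := st.1 + PySem.List.pyGetD b i 0
        let cnt := st.2.2 + 1
        let ans := if st.2.1 < sum ∧ cnt ≤ m then sum else st.2.1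
        if sum < 0 then (0, ans, 0) else (sum, ans, cnt))
      (0, -999999999999999999, 0)).2.1)

-- ===== PORT B =====
-- inner while loop of Source B: accumulate prefix sums until one goes below zero; returns (pref, new i).
-- fuel = remaining iteration bound (n - i), a totality guard only: the loop runs while i < n.
def solveAltInner (b : List Int) (n : Int) : Nat → Int → Int → List Int → List Int × Int
  | 0, i, _, pref => (pref, i)
  | fuel + 1, i, s, pref =>
    if i < n then
      let s' := s + PySem.List.pyGetD b i 0
      let pref' := pref ++ [s']
      if s' < 0 then (pref', i + 1) else solveAltInner b n fuel (i + 1) s' pref'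
    else (pref, i)

-- for j in range(k): if pref[j] > ans: ans = pref[j]
def solveAltScan (pref : List Int) (m : Int) (ans : Int) : Int :=
  (PySem.List.pyRange 0 (min (pref.length : Int) m) 1).foldl
    (fun a j => let p := PySem.List.pyGetD pref j 0; if p > a then p else a) ans

-- outer while loop of Source B (fuel again only bounds the iterations: i strictly increases)
def solveAltOuter (b : List Int) (n m : Int) : Nat → Int → Int → Int
  | 0, _, ans => ans
  | fuel + 1, i, ans =>
    if i < n then
      let pr := solveAltInner b n (n - i).toNat i 0 []
      solveAltOuter b n m fuel pr.2 (solveAltScan pr.1 m ans)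
    else ans

def solve_alt (n : Int) (m : Int) (b : List Int) : Int :=
  solveAltOuter b n m n.toNat 0 (-999999999999999999)

-- ===== PRECONDITION & SPEC =====
-- A indexes b[i] for i in range(0, n): it raises IndexError iff n > len(b)
def Pre_solve (n : Int) (m : Int) (b : List Int) : Prop := n ≤ (b.length : Int)
instance (n : Int) (m : Int) (b : List Int) : Decidable (Pre_solve n m b) := by
  unfold Pre_solve; infer_instance
def pvWitness_solve : Int × Int × List Int := (3, 2, [1, -3, 2])

def Spec_solve (n : Int) (m : Int) (b : List Int) (out : Int) : Prop := out = solve_alt n m b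
instance (n : Int) (m : Int) (b : List Int) (out : Int) : Decidable (Spec_solve n m b out) := by
  unfold Spec_solve; infer_instance

-- ===== CLAIM (what is proved, stated in full; the proofs are below) =====
def Claim_equal_solve : Prop := ∀ (n : Int) (m : Int) (b : List Int), Dom_solve n m b → Pre_solve n m b → Spec_solve n m b (solve n m b)

-- ===== LEMMAS AND PROOFS =====

-- proof-side vocabulary: A's loop body over a list element, B's max-update, carving, offset scan
def pvStep (m : Int) (st : Int × Int × Int) (x : Int) : Int × Int × Int :=
  let sum := st.1 + x
  let cnt := st.2.2 + 1
  let ans := if st.2.1 < sum ∧ cnt ≤ m then sum else st.2.1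
  if sum < 0 then (0, ans, 0) else (sum, ans, cnt)

def pvUpd (ans p : Int) : Int := if p > ans then p else ans

def pvCarve : List Int → Int → List Int → List Int × List Int
  | [], _, acc => (acc, [])
  | x :: xs, s, acc =>
    let s' := s + x
    if s' < 0 then (acc ++ [s'], xs) else pvCarve xs s' (acc ++ [s'])

def pvScanC (m : Int) : List Int → Int → Int → Int
  | [], _, ans => ans
  | p :: ps, c, ans => pvScanC m ps (c + 1) (if c + 1 ≤ m then pvUpd ans p else ans)

theorem pvCarve_rest_len (l : List Int) : ∀ (s : Int) (acc : List Int),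
    (pvCarve l s acc).2.length ≤ l.length - 1 := by
  induction l with
  | nil => intro s acc; simp [pvCarve]
  | cons x xs ih =>
    intro s acc
    simp only [pvCarve]
    split
    · simp
    · have := ih (s + x) (acc ++ [s + x])
      simp at *
      omega

def pvOuterL (m : Int) : List Int → Int → Int
  | [], ans => ans
  | x :: xs, ans =>
    let pr := pvCarve (x :: xs) 0 []
    pvOuterL m pr.2 ((pr.1.take m.toNat).foldl pvUpd ans)
termination_by l => l.length
decreasing_by
  have := pvCarve_rest_len (x :: xs) 0 []
  simp at *
  omega

-- generic bridge: a fold over range(0,K) reading xs[j] is a fold over the first K elements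
theorem pvGetD_take (xs : List Int) (K j d : Int) (h0 : 0 ≤ j) (h1 : j < K)
    (h2 : K ≤ (xs.length : Int)) :
    PySem.List.pyGetD (xs.take K.toNat) j d = PySem.List.pyGetD xs j d := by
  have hlt : j < ((xs.take K.toNat).length : Int) := by simp; omega
  rw [PySem.List.pyGetD_eq_getElem (xs.take K.toNat) d h0 hlt,
    PySem.List.pyGetD_eq_getElem xs d h0 (by omega)]
  apply List.getElem_take

theorem pvFoldRange {α : Type} (xs : List Int) (K : Int) (f : α → Int → α) (init : α)
    (d : Int) (hK : K ≤ (xs.length : Int)) :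
    (PySem.List.pyRange 0 K 1).foldl (fun a j => f a (PySem.List.pyGetD xs j d)) init
      = (xs.take K.toNat).foldl f init := by
  rcases (by omega : K ≤ 0 ∨ 0 < K) with h | h
  · rw [PySem.List.pyRange_one_eq_nil h]
    have : K.toNat = 0 := by omega
    simp [this]
  · set ys := xs.take K.toNat with hys
    have hcong : ∀ (a : α), ∀ j ∈ PySem.List.pyRange 0 K 1,
        (fun a j => f a (PySem.List.pyGetD xs j d)) a j
          = (fun a j => f a (PySem.List.pyGetD ys j d)) a j := by
      intro a j hj
      rw [PySem.List.mem_pyRange_one] at hj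
      simp only [hys]
      rw [pvGetD_take xs K j d hj.1 hj.2 hK]
    rw [PySem.List.foldl_congr_mem _ _ _ _ hcong]
    have hlen : ((ys.length : Nat) : Int) = K := by simp [hys]; omega
    have hmain := PySem.List.foldl_pyRange_zero_pyGetD' ys d f init
    rw [hlen] at hmain
    exact hmain

-- A as a fold over the first n elements of b
theorem pvSolveList (n m : Int) (b : List Int) (h : n ≤ (b.length : Int)) :
    solve n m b = ((b.take n.toNat).foldl (pvStep m) (0, -999999999999999999, 0)).2.1 := by
  show (((PySem.List.pyRange 0 n 1).foldl
      (fun st j => pvStep m st (PySem.List.pyGetD b j 0)) (0, -999999999999999999, 0)).2.1) = _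
  rw [pvFoldRange b n (pvStep m) (0, -999999999999999999, 0) 0 h]

-- both forms of the conditional update agree
theorem pvUpd_if (ans p c m : Int) :
    (if ans < p ∧ c + 1 ≤ m then p else ans) = (if c + 1 ≤ m then pvUpd ans p else ans) := by
  unfold pvUpd
  split_ifs <;> omega

theorem pvCarve_acc (l : List Int) : ∀ (s : Int) (acc : List Int),
    pvCarve l s acc = (acc ++ (pvCarve l s []).1, (pvCarve l s []).2) := by
  induction l with
  | nil => intro s acc; simp [pvCarve]
  | cons x xs ih =>
    intro s acc
    simp only [pvCarve]
    split
    · simp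
    · rw [ih (s + x) (acc ++ [s + x]), ih (s + x) ([] ++ [s + x])]
      simp

-- SEGMENT LEMMA: running A's loop equals carving one segment and scanning it afterwards
theorem pvSegment (m : Int) (l : List Int) : ∀ (s c ans : Int),
    (l.foldl (pvStep m) (s, ans, c)).2.1
      = ((pvCarve l s []).2.foldl (pvStep m)
          (0, pvScanC m (pvCarve l s []).1 c ans, 0)).2.1 := by
  induction l with
  | nil => intro s c ans; simp [pvCarve, pvScanC]
  | cons x xs ih =>
    intro s c ans
    simp only [pvCarve, List.foldl_cons]
    have hstep : pvStep m (s, ans, c) x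
        = if s + x < 0 then (0, if ans < s + x ∧ c + 1 ≤ m then s + x else ans, 0)
          else (s + x, if ans < s + x ∧ c + 1 ≤ m then s + x else ans, c + 1) := rfl
    rw [hstep]
    split
    · -- reset: segment ends here
      rw [pvUpd_if ans (s + x) c m]
      simp only [List.nil_append, pvScanC]
    · -- continue the segment
      rw [ih (s + x) (c + 1) (if ans < s + x ∧ c + 1 ≤ m then s + x else ans)]
      rw [pvCarve_acc xs (s + x) ([] ++ [s + x])]
      rw [pvUpd_if ans (s + x) c m]
      simp only [List.nil_append, List.singleton_append, pvScanC]

-- offset scan = fold of the update over the first (m - c) prefix sums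
theorem pvScanC_take (m : Int) (pref : List Int) : ∀ (c ans : Int),
    pvScanC m pref c ans = (pref.take (m - c).toNat).foldl pvUpd ans := by
  induction pref with
  | nil => intro c ans; simp [pvScanC]
  | cons p ps ih =>
    intro c ans
    simp only [pvScanC]
    rw [ih (c + 1)]
    rcases (by omega : c + 1 ≤ m ∨ m < c + 1) with h | h
    · have h1 : (m - c).toNat = (m - (c + 1)).toNat + 1 := by omega
      rw [h1, List.take_succ_cons, List.foldl_cons, if_pos h]
    · have h1 : (m - c).toNat = 0 := by omega
      have h2 : (m - (c + 1)).toNat = 0 := by omega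
      rw [h1, h2, if_neg (by omega)]
      simp

-- A's whole fold equals the segment-by-segment outer loop
theorem pvFold_outerL (m : Int) (l : List Int) (ans : Int) :
    (l.foldl (pvStep m) (0, ans, 0)).2.1 = pvOuterL m l ans := by
  fun_induction pvOuterL m l ans with
  | case1 ans => simp
  | case2 x xs ans pr ih =>
    rw [pvSegment m (x :: xs) 0 0 ans]
    rw [pvScanC_take m (pvCarve (x :: xs) 0 []).1 0 ans]
    simpa using ih

-- B's index-based scan = fold of the update over the first m prefix sums
theorem pvScanEq (pref : List Int) (m ans : Int) :
    solveAltScan pref m ans = (pref.take m.toNat).foldl pvUpd ans := by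
  have hmin : min ((pref.length : Nat) : Int) m ≤ ((pref.length : Nat) : Int) := min_le_left _ _
  have h1 : solveAltScan pref m ans
      = (pref.take (min ((pref.length : Nat) : Int) m).toNat).foldl pvUpd ans := by
    show (PySem.List.pyRange 0 (min ((pref.length : Nat) : Int) m) 1).foldl
        (fun a j => pvUpd a (PySem.List.pyGetD pref j 0)) ans = _
    exact pvFoldRange pref _ pvUpd ans 0 hmin
  rw [h1]
  congr 1
  rcases (by omega : m ≤ 0 ∨ 0 < m) with h | h
  · have h1 : (min ((pref.length : Nat) : Int) m).toNat = 0 := by omega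
    have h2 : m.toNat = 0 := by omega
    rw [h1, h2]
  · have h1 : (min ((pref.length : Nat) : Int) m).toNat = min pref.length m.toNat := by omega
    rw [h1, List.take_eq_take_iff]
    omega

-- b[i] viewed through the first-n-elements list
theorem pvDropCons (b : List Int) (n i : Int) (h0 : 0 ≤ i) (h1 : i < n)
    (h2 : n ≤ (b.length : Int)) :
    (b.take n.toNat).drop i.toNat
      = PySem.List.pyGetD b i 0 :: (b.take n.toNat).drop (i + 1).toNat := by
  have hlen : (b.take n.toNat).length = n.toNat := by simp; omega
  have hi : i.toNat < (b.take n.toNat).length := by omega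
  rw [List.drop_eq_getElem_cons hi]
  congr 1
  · rw [List.getElem_take]
    rw [PySem.List.pyGetD_eq_getElem b 0 h0 (by omega)]
  · congr 1
    omega

-- the inner loop never moves i backwards, and moves it forward when it runs
theorem solveAltInner_ge (b : List Int) (n : Int) :
    ∀ (fuel : Nat) (i s : Int) (pref : List Int), i ≤ (solveAltInner b n fuel i s pref).2 := by
  intro fuel
  induction fuel with
  | zero => intro i s pref; simp [solveAltInner]
  | succ fuel ih =>
    intro i s pref
    simp only [solveAltInner]
    split
    · split
      · simp
      · have := ih (i + 1) (s + PySem.List.pyGetD b i 0) (pref ++ [s + PySem.List.pyGetD b i 0])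
        omega
    · simp

theorem solveAltInner_lt (b : List Int) (n : Int) (fuel : Nat) (i s : Int) (pref : List Int)
    (hf : 0 < fuel) (h : i < n) : i < (solveAltInner b n fuel i s pref).2 := by
  obtain ⟨t, rfl⟩ : ∃ t, fuel = t + 1 := ⟨fuel - 1, by omega⟩
  simp only [solveAltInner, if_pos h]
  split
  · simp
  · have := solveAltInner_ge b n t (i + 1) (s + PySem.List.pyGetD b i 0)
      (pref ++ [s + PySem.List.pyGetD b i 0])
    omega

-- when the loop guard fails, the inner loop returns immediately whatever the fuel
theorem solveAltInner_done (b : List Int) (n : Int) (fuel : Nat) (i s : Int)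
    (acc : List Int) (h : ¬ i < n) : solveAltInner b n fuel i s acc = (acc, i) := by
  cases fuel <;> simp [solveAltInner, h]

-- B's inner while loop = pvCarve on the remaining elements
theorem pvInner (b : List Int) (n : Int) (hn : n ≤ (b.length : Int)) :
    ∀ (fuel : Nat) (i s : Int) (acc : List Int), (n - i).toNat ≤ fuel → 0 ≤ i → i ≤ n →
      (solveAltInner b n fuel i s acc).1 = (pvCarve ((b.take n.toNat).drop i.toNat) s acc).1 ∧
      (solveAltInner b n fuel i s acc).2 ≤ n ∧
      (b.take n.toNat).drop ((solveAltInner b n fuel i s acc).2.toNat)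
        = (pvCarve ((b.take n.toNat).drop i.toNat) s acc).2 := by
  intro fuel
  induction fuel with
  | zero =>
    intro i s acc hk h0 h1
    have hin : i = n := by omega
    rw [solveAltInner_done b n 0 i s acc (by omega)]
    have hnil : (b.take n.toNat).drop i.toNat = [] := by
      apply List.drop_eq_nil_of_le
      simp
      omega
    rw [hnil]
    refine ⟨by simp [pvCarve], by omega, ?_⟩
    simp [pvCarve]
  | succ fuel ih =>
    intro i s acc hk h0 h1
    rcases (by omega : i < n ∨ n ≤ i) with hilt | hige
    · rw [solveAltInner]
      rw [if_pos hilt]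
      rw [pvDropCons b n i h0 hilt hn]
      simp only [pvCarve]
      split
      · -- prefix sum went below zero: segment ends, rest is the remaining elements
        refine ⟨rfl, by omega, ?_⟩
        congr 1
      · -- continue carving
        exact ih (i + 1) (s + PySem.List.pyGetD b i 0) (acc ++ [s + PySem.List.pyGetD b i 0])
          (by omega) (by omega) (by omega)
    · rw [solveAltInner_done b n (fuel + 1) i s acc (by omega)]
      have hnil : (b.take n.toNat).drop i.toNat = [] := by
        apply List.drop_eq_nil_of_le
        simp
        omega
      rw [hnil]
      refine ⟨by simp [pvCarve], by omega, ?_⟩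
      simp [pvCarve]

-- B's outer while loop = pvOuterL on the remaining elements
theorem pvOuterConv (b : List Int) (n m : Int) (hn : n ≤ (b.length : Int)) :
    ∀ (fuel : Nat) (i ans : Int), (n - i).toNat ≤ fuel → 0 ≤ i →
      solveAltOuter b n m fuel i ans = pvOuterL m ((b.take n.toNat).drop i.toNat) ans := by
  intro fuel
  induction fuel with
  | zero =>
    intro i ans hk h0
    have hnil : (b.take n.toNat).drop i.toNat = [] := by
      apply List.drop_eq_nil_of_le
      simp
      omega
    rw [hnil, solveAltOuter, pvOuterL]
  | succ fuel ih =>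
    intro i ans hk h0
    rcases (by omega : i < n ∨ n ≤ i) with hilt | hige
    · -- one segment is carved, then the loop continues past it
      rw [solveAltOuter, if_pos hilt]
      obtain ⟨hpref, hle, hrest⟩ :=
        pvInner b n hn (n - i).toNat i 0 [] (le_refl _) h0 (by omega)
      have hlt : i < (solveAltInner b n (n - i).toNat i 0 []).2 :=
        solveAltInner_lt b n (n - i).toNat i 0 [] (by omega) hilt
      rw [ih (solveAltInner b n (n - i).toNat i 0 []).2 _ (by omega) (by omega)]
      rw [hrest, hpref]
      rw [pvDropCons b n i h0 hilt hn]
      rw [pvOuterL, pvScanEq]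
    · rw [solveAltOuter, if_neg (by omega)]
      have hnil : (b.take n.toNat).drop i.toNat = [] := by
        apply List.drop_eq_nil_of_le
        simp
        omega
      rw [hnil, pvOuterL]

-- ===== VERDICT (by name: the statement is the Claim_ definition above) =====
theorem solve_spec : Claim_equal_solve := by
  intro n m b _ hpre
  unfold Pre_solve at hpre
  unfold Spec_solve solve_alt
  rw [pvSolveList n m b hpre, pvFold_outerL]
  rw [pvOuterConv b n m hpre n.toNat 0 (-999999999999999999) (by omega) (le_refl 0)]
  simp
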